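-- pv_equiv track=rewrite | github.com/4-trees-in-summer/Algorithm-CT | 프로그래머스/lv3/42628. 이중우선순위큐/이중우선순위큐.py | solution
-- ===== SOURCE A (Python) =====
-- from collections import deque
--
-- def solution(operations):
--     answer = []
--     ans = deque()
--
--     for i in operations :
--         if i[0] == 'I' :
--             ans.append(int(i[1:].lstrip()))
--         elif i == 'D 1' and len(ans) != 0 :
--             ans.remove(max(ans))
--         elif i == 'D -1' and len(ans) != 0 :
--             ans.remove(min(ans))
--
--
--     if ans :
--         return [max(ans), min(ans)]
--     else:
--         return [0, 0]
-- ===== SOURCE B (Python) =====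
-- def solution(operations):
--     s = []  # multiset kept in ascending order
--     for op in operations:
--         if op[0] == 'I':
--             v = int(op[1:])
--             i = 0
--             while i < len(s) and s[i] <= v:
--                 i += 1
--             s.insert(i, v)
--         elif op == 'D 1' and s:
--             s.pop()
--         elif op == 'D -1' and s:
--             s.pop(0)
--     return [s[-1], s[0]] if s else [0, 0]
-- ===== Notes on version B (the rewrite author's own statement) =====
-- stated objective: alternative
-- what changed: B maintains the multiset as an ascending sorted list (insert at the found position, pop an end for delete-max/min) instead of A's deque with per-delete max()/min() scans plus remove().
import Mathlib
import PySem

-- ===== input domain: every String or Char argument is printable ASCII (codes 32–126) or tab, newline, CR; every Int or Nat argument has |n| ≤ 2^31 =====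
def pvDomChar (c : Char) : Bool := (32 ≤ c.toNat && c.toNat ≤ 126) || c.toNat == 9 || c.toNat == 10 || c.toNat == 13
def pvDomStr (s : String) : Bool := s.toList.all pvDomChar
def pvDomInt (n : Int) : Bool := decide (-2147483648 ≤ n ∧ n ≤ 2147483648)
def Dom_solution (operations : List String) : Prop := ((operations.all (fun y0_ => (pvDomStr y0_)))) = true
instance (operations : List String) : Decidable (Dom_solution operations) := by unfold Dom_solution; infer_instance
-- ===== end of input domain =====

-- B keeps the multiset as an ascending sorted list (delete-max/min = pop an end) instead of
-- A's deque with a max()/min() scan plus remove() per delete; return values proved equal.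

-- ===== PORT A =====
-- one loop iteration of A (the body of `for i in operations`)
def stepA (ans : List Int) (i : String) : List Int :=
  match i.toList with
  | [] => ans        -- i[0] would raise IndexError; excluded by Pre_
  | c :: rest =>
    if c = 'I' then
      ans ++ [(PySem.Int.ofChars? (PySem.Chars.lstrip rest)).getD 0]  -- int failure excluded by Pre_
    else if i = "D 1" ∧ ans ≠ [] then
      (PySem.List.remove? ans ((PySem.List.max? ans (fun y => y)).getD 0)).getD ans
    else if i = "D -1" ∧ ans ≠ [] then
      (PySem.List.remove? ans ((PySem.List.min? ans (fun y => y)).getD 0)).getD ans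
    else ans

def solution (operations : List String) : List Int :=
  let ans := operations.foldl stepA []
  if ans = [] then [0, 0]
  else [(PySem.List.max? ans (fun y => y)).getD 0, (PySem.List.min? ans (fun y => y)).getD 0]

-- ===== PORT B =====
-- the while-loop + insert of Source B: insert v after all elements ≤ v
def insAfter (v : Int) : List Int → List Int
  | [] => [v]
  | x :: t => if x ≤ v then x :: insAfter v t else v :: x :: t

-- one loop iteration of B
def stepB (s : List Int) (op : String) : List Int :=
  match op.toList with
  | [] => s          -- op[0] would raise IndexError; excluded by Pre_
  | c :: rest =>
    if c = 'I' then insAfter ((PySem.Int.ofChars? rest).getD 0) s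
    else if op = "D 1" ∧ s ≠ [] then s.dropLast
    else if op = "D -1" ∧ s ≠ [] then s.tail
    else s

def solution_alt (operations : List String) : List Int :=
  let s := operations.foldl stepB []
  match s with
  | [] => [0, 0]
  | x :: t => [(x :: t).getLast (List.cons_ne_nil x t), x]

-- ===== PRECONDITION & SPEC =====
-- Pre_ excludes exactly the inputs on which A raises: an empty operation string (IndexError on
-- i[0]) or an 'I'-operation whose remainder int() cannot parse (ValueError).
def Pre_solution (operations : List String) : Prop :=
  ∀ op ∈ operations, op.toList ≠ [] ∧
    (op.toList.head? = some 'I' → (PySem.Int.ofChars? (op.toList.drop 1)).isSome = true)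
instance (operations : List String) : Decidable (Pre_solution operations) := by
  unfold Pre_solution; infer_instance

def pvWitness_solution : List String := ["I 16", "I -5645", "D -1", "D 1", "I 123"]

def Spec_solution (operations : List String) (out : List Int) : Prop := out = solution_alt operations
instance (operations : List String) (out : List Int) : Decidable (Spec_solution operations out) := by
  unfold Spec_solution; infer_instance

-- ===== CLAIM (what is proved, stated in full; the proofs are below) =====
def Claim_equal_solution : Prop := ∀ (operations : List String), Dom_solution operations → Pre_solution operations → Spec_solution operations (solution operations)

-- ===== LEMMAS AND PROOFS =====

theorem char_eq_iff_toNat (c d : Char) : c = d ↔ c.toNat = d.toNat := by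
  constructor
  · rintro rfl; rfl
  · intro h; exact Char.ext (UInt32.toNat_inj.mp h)

-- On domain characters, str.isspace agrees with the whitespace int() strips.
theorem isspace_eq_isIntSpace (c : Char) (h : pvDomChar c = true) :
    PySem.Chars.isspace c = PySem.Int.isIntSpace c := by
  simp [pvDomChar] at h
  simp only [PySem.Chars.isspace, PySem.Int.isIntSpace,
    char_eq_iff_toNat, show (' ').toNat = 32 from rfl, show ('\t').toNat = 9 from rfl,
    show ('\n').toNat = 10 from rfl, show ('\x0d').toNat = 13 from rfl,
    show ('\x0b').toNat = 11 from rfl, show ('\x0c').toNat = 12 from rfl]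
  apply Bool.eq_iff_iff.mpr
  constructor <;> (intro hx; simp only [Bool.or_eq_true, Bool.and_eq_true, decide_eq_true_eq] at hx ⊢; omega)

theorem dropWhile_lstrip (cs : List Char) (h : ∀ c ∈ cs, pvDomChar c = true) :
    List.dropWhile PySem.Int.isIntSpace (PySem.Chars.lstrip cs)
      = List.dropWhile PySem.Int.isIntSpace cs := by
  induction cs with
  | nil => rfl
  | cons c t ih =>
    simp only [PySem.Chars.lstrip] at *
    by_cases hc : PySem.Chars.isspace c = true
    · have hint : PySem.Int.isIntSpace c = true :=
        (isspace_eq_isIntSpace c (h c (by simp))) ▸ hc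
      rw [List.dropWhile_cons_of_pos hc, ih (fun x hx => h x (by simp [hx])),
        List.dropWhile_cons_of_pos hint]
    · rw [List.dropWhile_cons_of_neg hc]

theorem ofChars_lstrip (cs : List Char) (h : ∀ c ∈ cs, pvDomChar c = true) :
    PySem.Int.ofChars? (PySem.Chars.lstrip cs) = PySem.Int.ofChars? cs := by
  unfold PySem.Int.ofChars?
  rw [dropWhile_lstrip cs h]

theorem insAfter_perm (v : Int) (s : List Int) : (insAfter v s).Perm (v :: s) := by
  induction s with
  | nil => simp [insAfter]
  | cons x t ih =>
    simp only [insAfter]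
    split
    · exact (ih.cons x).trans (List.Perm.swap v x t)
    · exact List.Perm.refl _

theorem insAfter_pairwise (v : Int) (s : List Int) (h : s.Pairwise (· ≤ ·)) :
    (insAfter v s).Pairwise (· ≤ ·) := by
  induction s with
  | nil => simp [insAfter]
  | cons x t ih =>
    rcases List.pairwise_cons.mp h with ⟨hx, ht⟩
    simp only [insAfter]
    split
    · rename_i hxv
      refine List.pairwise_cons.mpr ⟨?_, ih ht⟩
      intro y hy
      rcases List.mem_cons.mp ((insAfter_perm v t).mem_iff.mp hy) with hyt | hyt
      · rw [hyt]; exact hxv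
      · exact hx y hyt
    · refine List.pairwise_cons.mpr ⟨?_, h⟩
      intro y hy
      rcases List.mem_cons.mp hy with rfl | hyt
      · omega
      · have := hx y hyt; omega

theorem pairwise_getLast_max (s : List Int) (hs : s ≠ []) (h : s.Pairwise (· ≤ ·)) :
    ∀ y ∈ s, y ≤ s.getLast hs := by
  induction s with
  | nil => cases hs rfl
  | cons x t ih =>
    rcases List.pairwise_cons.mp h with ⟨hx, ht⟩
    intro y hy
    cases t with
    | nil => simp at hy; simp [hy, List.getLast]
    | cons z t' =>
      have hgl : (x :: z :: t').getLast (by simp) = (z :: t').getLast (by simp) :=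
        List.getLast_cons (by simp)
      rcases List.mem_cons.mp hy with rfl | hy'
      · rw [hgl]; exact hx _ (List.getLast_mem (by simp))
      · rw [hgl]; exact ih (by simp) ht y hy'

-- On lists that are permutations of each other, max() is the last and min() the head of a sorted copy.
theorem max_eq_getLast (a s : List Int) (hp : s.Perm a) (hsort : s.Pairwise (· ≤ ·))
    (hns : s ≠ []) : PySem.List.max? a (fun y => y) = some (s.getLast hns) := by
  cases hma : PySem.List.max? a (fun y => y) with
  | none =>
    rw [PySem.List.max?_eq_none_iff] at hma
    rw [hma] at hp
    exact absurd hp.eq_nil hns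
  | some m =>
    have h1 : m ≤ s.getLast hns :=
      pairwise_getLast_max s hns hsort m (hp.mem_iff.mpr (PySem.List.max?_mem hma))
    have h2 : s.getLast hns ≤ m :=
      PySem.List.max?_isMax hma _ (hp.mem_iff.mp (List.getLast_mem hns))
    rw [le_antisymm h1 h2]

theorem min_eq_head (a : List Int) (x : Int) (t : List Int) (hp : (x :: t).Perm a)
    (hsort : (x :: t).Pairwise (· ≤ ·)) : PySem.List.min? a (fun y => y) = some x := by
  cases hma : PySem.List.min? a (fun y => y) with
  | none =>
    rw [PySem.List.min?_eq_none_iff] at hma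
    rw [hma] at hp
    simpa using hp.eq_nil
  | some m =>
    have h1 : m ≤ x := PySem.List.min?_isMin hma x (hp.mem_iff.mp (by simp))
    have h2 : x ≤ m := by
      rcases List.mem_cons.mp (hp.mem_iff.mpr (PySem.List.min?_mem hma)) with h | h
      · omega
      · exact (List.pairwise_cons.mp hsort).1 m h
    rw [le_antisymm h1 h2]

theorem step_perm (op : String) (hdom : pvDomStr op = true) (a s : List Int)
    (hp : s.Perm a) (hsort : s.Pairwise (· ≤ ·)) :
    (stepB s op).Perm (stepA a op) ∧ (stepB s op).Pairwise (· ≤ ·) := by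
  have hchars : ∀ c ∈ op.toList, pvDomChar c = true := by
    simpa [pvDomStr, List.all_eq_true] using hdom
  have hnil : s = [] ↔ a = [] :=
    ⟨fun he => (he ▸ hp).symm.eq_nil, fun he => (he ▸ hp).eq_nil⟩
  cases hl : op.toList with
  | nil => simp only [stepA, stepB, hl]; exact ⟨hp, hsort⟩
  | cons c rest =>
    simp only [stepA, stepB, hl]
    by_cases hc : c = 'I'
    · subst hc
      rw [if_pos rfl, if_pos rfl,
        ofChars_lstrip rest (fun x hx => hchars x (by simp [hl, hx]))]
      set v := (PySem.Int.ofChars? rest).getD 0 with hv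
      exact ⟨(insAfter_perm v s).trans ((hp.cons v).trans (List.perm_append_singleton v a).symm),
        insAfter_pairwise v s hsort⟩
    · rw [if_neg hc, if_neg hc]
      by_cases h1 : op = "D 1" ∧ s ≠ []
      · have h1a : op = "D 1" ∧ a ≠ [] := ⟨h1.1, fun he => h1.2 (hnil.mpr he)⟩
        rw [if_pos h1, if_pos h1a]
        have hns : s ≠ [] := h1.2
        have hm := max_eq_getLast a s hp hsort hns
        set m := s.getLast hns with hmdef
        have hmema : m ∈ a := PySem.List.max?_mem hm
        rw [hm, Option.getD_some, PySem.List.remove?_eq_some_erase a m hmema, Option.getD_some]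
        have h2 : s.Perm (m :: s.dropLast) := by
          conv_lhs => rw [← List.dropLast_append_getLast hns]
          exact List.perm_append_singleton _ _
        have h3 : (s.erase m).Perm s.dropLast :=
          (((List.perm_cons_erase (hp.mem_iff.mpr hmema)).symm.trans h2).cons_inv)
        exact ⟨h3.symm.trans (hp.erase m), hsort.sublist (List.dropLast_sublist s)⟩
      · have h1a : ¬ (op = "D 1" ∧ a ≠ []) := fun hx => h1 ⟨hx.1, fun he => hx.2 (hnil.mp he)⟩
        rw [if_neg h1, if_neg h1a]
        by_cases h2 : op = "D -1" ∧ s ≠ []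
        · have h2a : op = "D -1" ∧ a ≠ [] := ⟨h2.1, fun he => h2.2 (hnil.mpr he)⟩
          rw [if_pos h2, if_pos h2a]
          obtain ⟨x, t, rfl⟩ := List.exists_cons_of_ne_nil h2.2
          have hm := min_eq_head a x t hp hsort
          rw [hm, Option.getD_some,
            PySem.List.remove?_eq_some_erase a x (PySem.List.min?_mem hm), Option.getD_some]
          refine ⟨?_, ?_⟩
          · simp only [List.tail_cons]
            have hx : (x :: t).erase x = t := List.erase_cons_head x t
            exact hx ▸ (hp.erase x)
          · simp only [List.tail_cons]
            exact (List.pairwise_cons.mp hsort).2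
        · have h2a : ¬ (op = "D -1" ∧ a ≠ []) := fun hx => h2 ⟨hx.1, fun he => hx.2 (hnil.mp he)⟩
          rw [if_neg h2, if_neg h2a]
          exact ⟨hp, hsort⟩

theorem fold_perm (ops : List String) (hdom : ∀ op ∈ ops, pvDomStr op = true) (a s : List Int)
    (hp : s.Perm a) (hsort : s.Pairwise (· ≤ ·)) :
    (ops.foldl stepB s).Perm (ops.foldl stepA a) ∧ (ops.foldl stepB s).Pairwise (· ≤ ·) := by
  induction ops generalizing a s with
  | nil => exact ⟨hp, hsort⟩
  | cons op t ih =>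
    have h1 := step_perm op (hdom op (by simp)) a s hp hsort
    exact ih (fun o ho => hdom o (by simp [ho])) _ _ h1.1 h1.2

-- ===== VERDICT (by name: the statement is the Claim_ definition above) =====
theorem solution_spec : Claim_equal_solution := by
  intro ops hdom _hpre
  unfold Spec_solution solution solution_alt
  have hd : ∀ op ∈ ops, pvDomStr op = true := by
    simpa [Dom_solution, List.all_eq_true] using hdom
  obtain ⟨hperm, hsort⟩ := fold_perm ops hd [] [] (List.Perm.refl _) (by simp)
  cases hs : ops.foldl stepB [] with
  | nil =>
    rw [hs] at hperm
    have : ops.foldl stepA [] = [] := hperm.symm.eq_nil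
    simp [this]
  | cons x t =>
    rw [hs] at hperm hsort
    have hna : ops.foldl stepA [] ≠ [] := fun he => by simp [he] at hperm
    rw [if_neg hna]
    rw [max_eq_getLast _ _ hperm hsort (by simp), min_eq_head _ _ _ hperm hsort]
    simp
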